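-- pv_equiv track=rewrite | github.com/HaloOrangeWang/NoiseMaker | code/datainputs/melody.py | melody_core_note
-- ===== SOURCE A (Python) =====
-- def melody_core_note(flattern_melody_data):
--     """
--     寻找主旋律的核心音符
--     :param flattern_melody_data: 主旋律 展开形式 相对音高
--     :return: 核心音列表
--     """
--     # TODO 不同调式的rel_note和core_note
--     core_note_list = []
--     for step_it in range(0, len(flattern_melody_data)):
--         if flattern_melody_data[step_it] == 0:  # 如果这个时间步长没有音符
--             if flattern_melody_data[step_it - step_it % 8] != 0:  # 先观察这一拍的第一个时间步长有没有音符 如果有则取之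
--                 core_note_list.append(flattern_melody_data[step_it - step_it % 8])
--             else:  # 如果这个时间步长没有音符 这一拍的第一个时间步长也没有音符 回溯前四拍 都没有则置为0
--                 find_note = False
--                 for note_it in range(step_it, max(-1, step_it - 33), -1):
--                     if flattern_melody_data[note_it] != 0:
--                         core_note_list.append(flattern_melody_data[note_it])
--                         find_note = True
--                         break
--                 if find_note is False:
--                     core_note_list.append(0)
--         else:  # 这一拍有音符
--             if flattern_melody_data[step_it - step_it % 8] != 0:  # 不是这一拍的第一个时间步长 那么先观察这一拍的第一个时间步长有没有音符 如果有则取之 如果没有则使用这个时间步长的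
--                 core_note_list.append(flattern_melody_data[step_it - step_it % 8])
--             else:
--                 core_note_list.append(flattern_melody_data[step_it])
--     return core_note_list
-- ===== SOURCE B (Python) =====
-- def melody_core_note(flattern_melody_data):
--     """One pass: remember the last nonzero step and check it against the 33-step window."""
--     out = []
--     last_i = None
--     last_v = 0
--     for i, v in enumerate(flattern_melody_data):
--         beat = flattern_melody_data[i - i % 8]
--         if beat != 0:
--             out.append(beat)
--         elif v != 0:
--             out.append(v)
--         elif last_i is not None and i - last_i <= 32:
--             out.append(last_v)
--         else:
--             out.append(0)
--         if v != 0: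
--             last_i = i
--             last_v = v
--     return out
-- ===== Notes on version B (the rewrite author's own statement) =====
-- stated objective: alternative
-- what changed: A backtracks up to 33 steps at every silent beat; B makes a single pass that remembers the last nonzero (index, value) and answers the window query in O(1).
import Mathlib
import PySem

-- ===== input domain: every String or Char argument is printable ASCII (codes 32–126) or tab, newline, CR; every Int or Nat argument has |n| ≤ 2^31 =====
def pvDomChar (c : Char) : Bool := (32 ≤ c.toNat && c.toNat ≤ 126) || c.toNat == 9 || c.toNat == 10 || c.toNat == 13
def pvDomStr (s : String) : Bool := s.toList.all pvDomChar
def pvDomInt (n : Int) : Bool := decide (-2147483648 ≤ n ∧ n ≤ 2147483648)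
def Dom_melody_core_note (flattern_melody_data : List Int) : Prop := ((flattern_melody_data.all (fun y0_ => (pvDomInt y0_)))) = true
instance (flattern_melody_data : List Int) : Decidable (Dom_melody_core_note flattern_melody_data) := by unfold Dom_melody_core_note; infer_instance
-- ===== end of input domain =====

-- B replaces A's per-step 33-step backtracking inner loop by a single pass that remembers
-- the last nonzero step (objective: remove the inner scan).

-- ===== PORT A =====

-- A's inner loop 'for note_it in range(step_it, max(-1, step_it-33), -1)': returns the first
-- nonzero value found (the break), none if the loop falls through without finding one.
def innerA (d : List Int) (note_it stop : Int) : Option Int :=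
  if h : note_it ≤ stop then none
  else if PySem.List.pyGetD d note_it 0 ≠ 0 then some (PySem.List.pyGetD d note_it 0)
  else innerA d (note_it - 1) stop
termination_by (note_it - stop).toNat
decreasing_by omega

-- A's outer loop 'for step_it in range(0, len(...))', appending to core_note_list (= acc).
def goA (d : List Int) (step_it : Nat) (acc : List Int) : List Int :=
  if step_it < d.length then
    goA d (step_it + 1)
      (if PySem.List.pyGetD d (step_it : Int) 0 = 0 then
        if PySem.List.pyGetD d ((step_it : Int) - PySem.Int.mod (step_it : Int) 8) 0 ≠ 0 then
          acc ++ [PySem.List.pyGetD d ((step_it : Int) - PySem.Int.mod (step_it : Int) 8) 0]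
        else
          match innerA d (step_it : Int) (max (-1) ((step_it : Int) - 33)) with
          | some v => acc ++ [v]        -- found and appended inside the loop (find_note = True)
          | none => acc ++ [0]          -- find_note is False
      else
        if PySem.List.pyGetD d ((step_it : Int) - PySem.Int.mod (step_it : Int) 8) 0 ≠ 0 then
          acc ++ [PySem.List.pyGetD d ((step_it : Int) - PySem.Int.mod (step_it : Int) 8) 0]
        else
          acc ++ [PySem.List.pyGetD d (step_it : Int) 0])
  else acc
termination_by d.length - step_it

def melody_core_note (flattern_melody_data : List Int) : List Int :=
  goA flattern_melody_data 0 []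

-- ===== PORT B =====

-- B's single pass 'for i, v in enumerate(...)' carrying the last nonzero (index, value).
def goB (d : List Int) : List Int → Nat → Option (Nat × Int) → List Int
  | [], _, _ => []
  | v :: rest', i, last =>
    (if PySem.List.pyGetD d ((i : Int) - PySem.Int.mod (i : Int) 8) 0 ≠ 0 then
       PySem.List.pyGetD d ((i : Int) - PySem.Int.mod (i : Int) 8) 0
     else if v ≠ 0 then v
     else match last with
       | some (j, w) => if (i : Int) - (j : Int) ≤ 32 then w else 0
       | none => 0)
    :: goB d rest' (i + 1) (if v ≠ 0 then some (i, v) else last)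

def melody_core_note_alt (flattern_melody_data : List Int) : List Int :=
  goB flattern_melody_data flattern_melody_data 0 none

-- ===== PRECONDITION & SPEC =====
def Spec_melody_core_note (flattern_melody_data : List Int) (out : List Int) : Prop := out = melody_core_note_alt flattern_melody_data
instance (flattern_melody_data : List Int) (out : List Int) : Decidable (Spec_melody_core_note flattern_melody_data out) := by unfold Spec_melody_core_note; infer_instance

-- ===== CLAIM (what is proved, stated in full; the proofs are below) =====
def Claim_equal_melody_core_note : Prop := ∀ (flattern_melody_data : List Int), Dom_melody_core_note flattern_melody_data → Spec_melody_core_note flattern_melody_data (melody_core_note flattern_melody_data)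

-- ===== LEMMAS AND PROOFS =====

-- last nonzero (index, value) among indices < i
def lastNZ (d : List Int) : Nat → Option (Nat × Int)
  | 0 => none
  | i + 1 => if d.getD i 0 ≠ 0 then some (i, d.getD i 0) else lastNZ d i

-- the element both programs emit at index i
def elemB (d : List Int) (i : Nat) : Int :=
  if d.getD (i - i % 8) 0 ≠ 0 then d.getD (i - i % 8) 0
  else if d.getD i 0 ≠ 0 then d.getD i 0
  else match lastNZ d i with
    | some (j, w) => if (i : Int) - (j : Int) ≤ 32 then w else 0
    | none => 0

lemma lastNZ_lt (d : List Int) (i : Nat) {j : Nat} {w : Int}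
    (h : lastNZ d i = some (j, w)) : j < i := by
  induction i with
  | zero => simp [lastNZ] at h
  | succ i ih =>
    unfold lastNZ at h
    split at h
    · simp at h; omega
    · have := ih h; omega

lemma lastNZ_succ (d : List Int) (m : Nat) (hm : d.getD m 0 = 0) :
    lastNZ d (m + 1) = lastNZ d m := by
  conv_lhs => rw [lastNZ]
  rw [if_neg (by simpa using hm)]

lemma pyGetD_nat (d : List Int) (k : Nat) :
    PySem.List.pyGetD d (k : Int) 0 = d.getD k 0 := by
  simp [PySem.List.pyGetD_natCast]

lemma innerA_eq (d : List Int) (k : Nat) (s : Int) (hs : -1 ≤ s) :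
    innerA d (k : Int) s =
      match lastNZ d (k + 1) with
      | some (j, w) => if s < (j : Int) then some w else none
      | none => none := by
  induction k with
  | zero =>
    unfold innerA
    by_cases hks : ((0 : Nat) : Int) ≤ s
    · rw [dif_pos hks]
      cases hL : lastNZ d 1 with
      | none => rfl
      | some p =>
        obtain ⟨j, w⟩ := p
        have hj : j < 1 := lastNZ_lt d 1 hL
        simp only
        rw [if_neg (by simp at hks; omega)]
    · rw [dif_neg hks]
      rw [pyGetD_nat]
      by_cases hz : d.getD 0 0 ≠ 0
      · rw [if_pos hz]
        unfold lastNZ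
        rw [if_pos hz]
        simp only
        rw [if_pos (by simp at hks ⊢; omega)]
      · simp only [ne_eq, not_not] at hz
        rw [if_neg (by simpa using hz)]
        unfold innerA
        rw [dif_pos (by simp at hks ⊢; omega)]
        rw [lastNZ_succ d 0 hz]
        simp [lastNZ]
  | succ k ih =>
    unfold innerA
    by_cases hks : (((k + 1 : Nat)) : Int) ≤ s
    · rw [dif_pos hks]
      cases hL : lastNZ d (k + 1 + 1) with
      | none => rfl
      | some p =>
        obtain ⟨j, w⟩ := p
        have hj : j < k + 1 + 1 := lastNZ_lt d _ hL
        simp only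
        rw [if_neg (by push_cast at hks ⊢; omega)]
    · rw [dif_neg hks]
      rw [pyGetD_nat]
      by_cases hz : d.getD (k + 1) 0 ≠ 0
      · rw [if_pos hz]
        unfold lastNZ
        rw [if_pos hz]
        simp only
        rw [if_pos (by push_cast at hks ⊢; omega)]
      · simp only [ne_eq, not_not] at hz
        rw [if_neg (by simpa using hz)]
        rw [show (((k + 1 : Nat)) : Int) - 1 = ((k : Nat) : Int) by push_cast; ring]
        rw [ih, lastNZ_succ d (k + 1) hz]

lemma beat_cast (i : Nat) :
    ((i : Int) - PySem.Int.mod (i : Int) 8) = ((i - i % 8 : Nat) : Int) := by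
  rw [show ((8:Int)) = ((8:Nat):Int) by norm_num, PySem.Int.mod_natCast]
  push_cast
  omega

lemma beat_getD (d : List Int) (i : Nat) :
    PySem.List.pyGetD d ((i : Int) - PySem.Int.mod (i : Int) 8) 0 = d.getD (i - i % 8) 0 := by
  rw [beat_cast, pyGetD_nat]

-- A appends exactly elemB at every index
lemma goA_eq (d : List Int) (i : Nat) (acc : List Int) :
    goA d i acc = acc ++ (List.range' i (d.length - i)).map (elemB d) := by
  by_cases h : i < d.length
  · rw [goA, if_pos h, goA_eq d (i + 1)]
    rw [show d.length - i = (d.length - (i + 1)) + 1 by omega, List.range'_succ, List.map_cons]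
    suffices hx :
        (if PySem.List.pyGetD d (i : Int) 0 = 0 then
          if PySem.List.pyGetD d ((i : Int) - PySem.Int.mod (i : Int) 8) 0 ≠ 0 then
            acc ++ [PySem.List.pyGetD d ((i : Int) - PySem.Int.mod (i : Int) 8) 0]
          else
            match innerA d (i : Int) (max (-1) ((i : Int) - 33)) with
            | some v => acc ++ [v]
            | none => acc ++ [0]
        else
          if PySem.List.pyGetD d ((i : Int) - PySem.Int.mod (i : Int) 8) 0 ≠ 0 then
            acc ++ [PySem.List.pyGetD d ((i : Int) - PySem.Int.mod (i : Int) 8) 0]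
          else
            acc ++ [PySem.List.pyGetD d (i : Int) 0]) = acc ++ [elemB d i] by
      rw [hx]; simp
    rw [beat_getD, pyGetD_nat, innerA_eq d i _ (by omega)]
    unfold elemB
    by_cases hz : d.getD i 0 = 0
    · rw [if_pos hz]
      by_cases hb : d.getD (i - i % 8) 0 ≠ 0
      · rw [if_pos hb, if_pos hb]
      · rw [if_neg hb, if_neg hb]
        rw [if_neg (by simpa using hz), lastNZ_succ d i hz]
        cases hL : lastNZ d i with
        | none => rfl
        | some p =>
          obtain ⟨j, w⟩ := p
          simp only
          by_cases hw : (i : Int) - (j : Int) ≤ 32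
          · rw [if_pos (by omega), if_pos hw]
          · rw [if_neg (by omega), if_neg hw]
    · rw [if_neg hz]
      by_cases hb : d.getD (i - i % 8) 0 ≠ 0
      · rw [if_pos hb, if_pos hb]
      · rw [if_neg hb, if_neg hb, if_pos hz]
  · rw [goA, if_neg h]
    simp [show d.length - i = 0 by omega]
termination_by d.length - i
decreasing_by omega

lemma getD_drop (d : List Int) (i : Nat) (v : Int) (rest : List Int)
    (h : d.drop i = v :: rest) : d.getD i 0 = v := by
  have h0 : d[i]? = some v := by
    have hd : (List.drop i d)[0]? = d[i + 0]? := List.getElem?_drop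
    rw [h] at hd
    simpa using hd.symm
  simp [List.getD, h0]

-- B's pass carries exactly lastNZ and emits elemB at every index
lemma goB_eq (d : List Int) (i : Nat) :
    goB d (d.drop i) i (lastNZ d i) = (List.range' i (d.length - i)).map (elemB d) := by
  cases h : d.drop i with
  | nil =>
    have hlen : d.length ≤ i := by
      by_contra hc
      have := List.drop_eq_nil_iff.mp h
      omega
    rw [goB]
    simp [show d.length - i = 0 by omega]
  | cons v rest =>
    have hi : i < d.length := by
      by_contra hc
      rw [List.drop_eq_nil_of_le (by omega)] at h
      exact (List.cons_ne_nil _ _ h.symm)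
    have hv : d.getD i 0 = v := getD_drop d i v rest h
    have hrest : d.drop (i + 1) = rest := by
      have hd : (d.drop i).drop 1 = d.drop (i + 1) := by
        simp [List.drop_drop]
      rw [← hd, h, List.drop_one]
      rfl
    have hlast : (if v ≠ 0 then some (i, v) else lastNZ d i) = lastNZ d (i + 1) := by
      conv_rhs => rw [lastNZ]
      rw [hv]
    simp only [goB]
    rw [hlast, ← hrest, goB_eq d (i + 1)]
    rw [show d.length - i = (d.length - (i + 1)) + 1 by omega, List.range'_succ, List.map_cons]
    congr 1
    rw [beat_getD]
    unfold elemB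
    by_cases hb : d.getD (i - i % 8) 0 ≠ 0
    · rw [if_pos hb, if_pos hb]
    · rw [if_neg hb, if_neg hb, hv]
termination_by d.length - i
decreasing_by
  have _hi : i < d.length := by
    by_contra hc
    rw [List.drop_eq_nil_of_le (by omega)] at h
    exact (List.cons_ne_nil _ _ h.symm)
  omega

-- ===== VERDICT (by name: the statement is the Claim_ definition above) =====
theorem melody_core_note_spec : Claim_equal_melody_core_note := by
  intro d _
  unfold Spec_melody_core_note melody_core_note melody_core_note_alt
  have hB := goB_eq d 0
  simp only [List.drop_zero] at hB
  rw [goA_eq d 0 [], show lastNZ d 0 = none from rfl] at *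
  rw [hB]
  simp
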